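-- pv_equiv track=rewrite | github.com/kf7lsu/RegfileCompiler-public | src/python/make_store_grid_wires.py | make_wire_names
-- ===== SOURCE A (Python) =====
-- def make_wire_names(prefix, dims):
-- 	prog = [prefix]
-- 	for dim in dims:
-- 		lastprog = prog
-- 		prog = list()
-- 		for wirename in lastprog:
-- 			for index in range(dim):
-- 				new_wire = wirename + '_' + str(index)
-- 				prog.append(new_wire)
-- 	return prog
-- ===== SOURCE B (Python) =====
-- def make_wire_names(prefix, dims):
--     if any(d <= 0 for d in dims):
--         return []
--     def combos(ds):
--         if not ds:
--             return [()]
--         rest = combos(ds[1:])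
--         return [(i,) + c for i in range(ds[0]) for c in rest]
--     return [prefix + ''.join('_' + str(i) for i in c) for c in combos(dims)]
-- ===== Notes on version B (the rewrite author's own statement) =====
-- stated objective: idiomatic
-- what changed: B builds the full Cartesian product of index tuples by recursion on dims and renders each name in one comprehension, instead of A's level-by-level frontier expansion that rebuilds the whole partial-name list at every dimension.
import Mathlib
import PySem

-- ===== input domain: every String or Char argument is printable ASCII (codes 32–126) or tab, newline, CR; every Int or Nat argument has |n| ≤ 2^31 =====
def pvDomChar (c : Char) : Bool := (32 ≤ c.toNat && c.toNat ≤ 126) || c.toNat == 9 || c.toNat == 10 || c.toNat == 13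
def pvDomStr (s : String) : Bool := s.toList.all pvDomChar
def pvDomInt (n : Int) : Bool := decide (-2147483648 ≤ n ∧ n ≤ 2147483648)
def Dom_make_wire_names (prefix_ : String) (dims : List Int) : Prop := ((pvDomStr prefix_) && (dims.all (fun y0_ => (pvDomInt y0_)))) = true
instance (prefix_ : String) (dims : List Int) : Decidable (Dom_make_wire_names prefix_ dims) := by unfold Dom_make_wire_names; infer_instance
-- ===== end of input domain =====

-- B: builds the Cartesian product of index tuples by recursion on dims, then renders each name once,
-- instead of A's level-by-level frontier expansion; same asymptotic cost, different decomposition.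

-- ===== PORT A =====
-- Python lists are dynamic arrays; '.append' is ported as Array.push (O(1)), the loops unchanged.
def make_wire_names (prefix_ : String) (dims : List Int) : List String :=
  (dims.foldl (fun prog dim =>
    prog.foldl (fun prog' wirename =>
      (PySem.List.pyRange 0 dim 1).foldl
        (fun p index => p.push (wirename ++ "_" ++ PySem.Int.toStr index)) prog') #[]) #[prefix_]).toList

-- ===== PORT B =====
-- combos: the recursive helper of Source B (Cartesian product of range(d) for d in dims)
def pvCombos : List Int → List (List Int)
  | [] => [[]]
  | d :: rest =>
      (PySem.List.pyRange 0 d 1).flatMap (fun i => (pvCombos rest).map (fun c => i :: c))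

-- ''.join('_' + str(i) for i in c), element by element
def pvSuffix : List Int → String
  | [] => ""
  | i :: c => "_" ++ PySem.Int.toStr i ++ pvSuffix c

-- Source B returns [] at once when some dim ≤ 0 (an empty axis empties the product)
def make_wire_names_alt (prefix_ : String) (dims : List Int) : List String :=
  if dims.any (fun d => decide (d ≤ 0)) then []
  else (pvCombos dims).map (fun c => prefix_ ++ pvSuffix c)

-- ===== PRECONDITION & SPEC =====
def Spec_make_wire_names (prefix_ : String) (dims : List Int) (out : List String) : Prop := out = make_wire_names_alt prefix_ dims
instance (prefix_ : String) (dims : List Int) (out : List String) : Decidable (Spec_make_wire_names prefix_ dims out) := by unfold Spec_make_wire_names; infer_instance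

-- ===== CLAIM (what is proved, stated in full; the proofs are below) =====
def Claim_equal_make_wire_names : Prop := ∀ (prefix_ : String) (dims : List Int), Dom_make_wire_names prefix_ dims → Spec_make_wire_names prefix_ dims (make_wire_names prefix_ dims)

-- ===== LEMMAS AND PROOFS =====

-- ===== VERDICT (by name: the statement is the Claim_ definition above) =====
lemma push_foldl_toList {α β : Type} (l : List α) (f : α → β) (a : Array β) :
    (l.foldl (fun p x => p.push (f x)) a).toList = a.toList ++ l.map f := by
  induction l generalizing a with
  | nil => simp
  | cons x l ih => rw [List.map_cons, List.foldl_cons, ih, Array.toList_push, List.append_assoc, List.singleton_append]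

lemma stepA_eq (prog : Array String) (d : Int) :
    (prog.foldl (fun prog' wirename =>
      (PySem.List.pyRange 0 d 1).foldl
        (fun p index => p.push (wirename ++ "_" ++ PySem.Int.toStr index)) prog') #[]).toList
    = prog.toList.flatMap (fun w => (PySem.List.pyRange 0 d 1).map (fun i => w ++ "_" ++ PySem.Int.toStr i)) := by
  rw [← Array.foldl_toList]
  generalize prog.toList = l
  induction l using List.reverseRecOn with
  | nil => simp
  | append_singleton l w ih =>
      rw [List.foldl_append, List.foldl_cons, List.foldl_nil, push_foldl_toList, ih,
        List.flatMap_append]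
      simp

lemma pvCombos_nonpos (ds : List Int) (d : Int) (hd : d ∈ ds) (h : d ≤ 0) :
    pvCombos ds = [] := by
  induction ds with
  | nil => cases hd
  | cons e ds ih =>
      rcases List.mem_cons.mp hd with rfl | hmem
      · show (PySem.List.pyRange 0 d 1).flatMap _ = []
        rw [PySem.List.pyRange_one_eq_nil h]
        rfl
      · show (PySem.List.pyRange 0 e 1).flatMap (fun i => (pvCombos ds).map (fun c => i :: c)) = []
        rw [ih hmem]
        simp [List.flatMap]

lemma key (ds : List Int) : ∀ (xs : Array String),
    (ds.foldl (fun prog dim =>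
      prog.foldl (fun prog' wirename =>
        (PySem.List.pyRange 0 dim 1).foldl
          (fun p index => p.push (wirename ++ "_" ++ PySem.Int.toStr index)) prog') #[]) xs).toList
    = xs.toList.flatMap (fun w => (pvCombos ds).map (fun c => w ++ pvSuffix c)) := by
  induction ds with
  | nil =>
      intro xs
      simp [pvCombos, pvSuffix]
  | cons d ds ih =>
      intro xs
      rw [List.foldl_cons, ih]
      have hstep := stepA_eq xs d
      rw [hstep, List.flatMap_assoc]
      congr 1
      funext w
      rw [List.flatMap_map]
      show (PySem.List.pyRange 0 d 1).flatMap
          (fun i => (pvCombos ds).map (fun c => (w ++ "_" ++ PySem.Int.toStr i) ++ pvSuffix c))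
        = (pvCombos (d :: ds)).map (fun c => w ++ pvSuffix c)
      simp only [pvCombos, List.map_flatMap, List.map_map, Function.comp_def, pvSuffix]
      congr 1
      funext i
      congr 1
      funext c
      simp [String.append_assoc]

theorem make_wire_names_spec : Claim_equal_make_wire_names := by
  intro prefix_ dims _
  unfold Spec_make_wire_names make_wire_names make_wire_names_alt
  rw [key]
  split_ifs with h
  · obtain ⟨d, hd, hle⟩ := List.any_eq_true.mp h
    rw [pvCombos_nonpos dims d hd (by exact_mod_cast of_decide_eq_true hle)]
    simp
  · simp
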